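-- pv_equiv track=rewrite | github.com/Aurel10/lab-python | BasicExamples/find_elements.py | find_element_two
-- ===== SOURCE A (Python) =====
-- def find_element_two(A, B):
--     dict_first = {}
--
--     for i in range(0, len(A)):
--         dict_first[A[i]] = 1
--
--     for i in range(0, len(B)):
--         if B[i] in dict_first.keys():
--             return True
--
--     return False
-- ===== SOURCE B (Python) =====
-- def find_element_two(A, B):
--     xs = sorted(A)
--     ys = sorted(B)
--     i = 0
--     j = 0
--     while i < len(xs) and j < len(ys):
--         if xs[i] == ys[j]:
--             return True
--         if xs[i] < ys[j]:
--             i += 1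
--         else:
--             j += 1
--     return False
-- ===== Notes on version B (the rewrite author's own statement) =====
-- stated objective: alternative
-- what changed: Replaces A's hash-dict membership scan with a sort-then-merge algorithm: both lists are sorted and a two-pointer lockstep scan looks for a common element, so no hash structure is built at all.
import Mathlib
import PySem

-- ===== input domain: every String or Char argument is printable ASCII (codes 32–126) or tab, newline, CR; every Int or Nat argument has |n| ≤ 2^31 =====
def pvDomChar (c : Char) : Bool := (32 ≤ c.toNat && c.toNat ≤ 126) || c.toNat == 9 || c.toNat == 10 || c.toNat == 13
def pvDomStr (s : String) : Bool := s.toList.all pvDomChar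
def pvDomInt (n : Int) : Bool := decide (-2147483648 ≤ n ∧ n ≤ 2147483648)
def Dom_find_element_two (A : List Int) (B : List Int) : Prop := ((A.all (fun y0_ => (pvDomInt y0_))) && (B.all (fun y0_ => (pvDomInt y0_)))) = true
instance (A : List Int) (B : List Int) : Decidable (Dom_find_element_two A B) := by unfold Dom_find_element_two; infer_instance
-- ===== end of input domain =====

-- B: a different algorithm — sort both lists and run a two-pointer lockstep merge scan for a
-- common element, instead of A's hash-dict build + membership scan; no hash structure at all.

-- ===== PORT A =====
-- 'for i in range(0, len(B)): if B[i] in dict_first.keys(): return True' / 'return False'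
def findLoopA (d : PySem.Dict Int Int) : List Int → Bool
  | [] => false
  | b :: rest => if (d.keys).contains b then true else findLoopA d rest

def find_element_two (A : List Int) (B : List Int) : Bool :=
  let dict_first := A.foldl (fun d x => d.insert x 1) PySem.Dict.empty
  findLoopA dict_first B

-- ===== PORT B =====
-- the while loop over indices i, j, written as the equivalent structural recursion
-- on the two sorted lists (advancing i = dropping the head of xs, likewise j / ys)
def mergeScan : List Int → List Int → Bool
  | [], _ => false
  | _ :: _, [] => false
  | a :: as, b :: bs =>
      if a = b then true
      else if a < b then mergeScan as (b :: bs)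
      else mergeScan (a :: as) bs
termination_by xs ys => xs.length + ys.length

def find_element_two_alt (A : List Int) (B : List Int) : Bool :=
  mergeScan (PySem.List.sorted A (fun x => x) false) (PySem.List.sorted B (fun x => x) false)

-- ===== PRECONDITION & SPEC =====
def Spec_find_element_two (A : List Int) (B : List Int) (out : Bool) : Prop := out = find_element_two_alt A B
instance (A : List Int) (B : List Int) (out : Bool) : Decidable (Spec_find_element_two A B out) := by unfold Spec_find_element_two; infer_instance

-- ===== CLAIM (what is proved, stated in full; the proofs are below) =====
def Claim_equal_find_element_two : Prop := ∀ (A : List Int) (B : List Int), Dom_find_element_two A B → Spec_find_element_two A B (find_element_two A B)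

-- ===== LEMMAS AND PROOFS =====

-- A's scan of B returns true iff some element of B is a key of the dict
lemma findLoopA_eq_any (d : PySem.Dict Int Int) (B : List Int) :
    findLoopA d B = B.any (fun b => (d.keys).contains b) := by
  induction B with
  | nil => rfl
  | cons b rest ih =>
      by_cases h : b ∈ d.keys
      · simp [findLoopA, h]
      · simp [findLoopA, h, ih]

-- the merge scan on two ≤-sorted lists finds a common element iff one exists
lemma mergeScan_iff : ∀ (xs ys : List Int), xs.Pairwise (· ≤ ·) → ys.Pairwise (· ≤ ·) →
    (mergeScan xs ys = true ↔ ∃ x, x ∈ xs ∧ x ∈ ys) := by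
  intro xs ys hx hy
  fun_induction mergeScan xs ys with
  | case1 ys => simp
  | case2 a as => simp
  | case3 as a bs =>
      simp only [true_iff]
      exact ⟨a, by simp, by simp⟩
  | case4 a as b bs hne hlt ih =>
      rw [List.pairwise_cons] at hx
      have hrec := ih hx.2 hy
      rw [hrec]
      constructor
      · rintro ⟨x, hxas, hxys⟩; exact ⟨x, List.mem_cons_of_mem _ hxas, hxys⟩
      · rintro ⟨x, hxA, hxys⟩
        rcases List.mem_cons.mp hxA with h | h
        · subst h
          -- x = a ∈ b :: bs, but b ≤ every element of b :: bs and a < b: contradiction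
          rcases List.mem_cons.mp hxys with h' | h'
          · omega
          · rw [List.pairwise_cons] at hy
            have := hy.1 _ h'
            omega
        · exact ⟨x, h, hxys⟩
  | case5 a as b bs hne hge ih =>
      rw [List.pairwise_cons] at hy
      have hrec := ih hx hy.2
      rw [hrec]
      constructor
      · rintro ⟨x, hxxs, hxbs⟩; exact ⟨x, hxxs, List.mem_cons_of_mem _ hxbs⟩
      · rintro ⟨x, hxxs, hxB⟩
        rcases List.mem_cons.mp hxB with h | h
        · subst h
          rcases List.mem_cons.mp hxxs with h' | h'
          · exact absurd h'.symm hne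
          · rw [List.pairwise_cons] at hx
            have := hx.1 _ h'
            omega
        · exact ⟨x, hxxs, h⟩

lemma ports_agree (A B : List Int) : find_element_two A B = find_element_two_alt A B := by
  unfold find_element_two find_element_two_alt
  rw [findLoopA_eq_any, PySem.Dict.keys_foldl_insert]
  have hk : PySem.Set.update (PySem.Dict.empty (κ := Int) (ν := Int)).keys A
      = PySem.Set.ofList A := rfl
  rw [hk]
  have hA : (PySem.List.sorted A (fun x => x) false).Pairwise (· ≤ ·) :=
    PySem.List.sorted_pairwise A (fun x => x)
  have hB : (PySem.List.sorted B (fun x => x) false).Pairwise (· ≤ ·) :=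
    PySem.List.sorted_pairwise B (fun x => x)
  have hiff := mergeScan_iff _ _ hA hB
  rcases h : mergeScan (PySem.List.sorted A (fun x => x) false)
      (PySem.List.sorted B (fun x => x) false) with _ | _
  · rw [List.any_eq_false]
    intro b hbB
    simp only [List.contains_iff_mem]
    intro hbA
    rw [h] at hiff
    have : ∃ x, x ∈ PySem.List.sorted A (fun x => x) false ∧
        x ∈ PySem.List.sorted B (fun x => x) false :=
      ⟨b, (PySem.List.mem_sorted ..).mpr (by
            have := (PySem.Set.mem_ofList (xs := A) (y := b)).mp hbA; exact this),
        (PySem.List.mem_sorted ..).mpr hbB⟩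
    simpa using hiff.mpr this
  · rw [h] at hiff
    obtain ⟨x, hxA, hxB⟩ := hiff.mp rfl
    rw [List.any_eq_true]
    refine ⟨x, (PySem.List.mem_sorted ..).mp hxB, ?_⟩
    simp only [List.contains_iff_mem]
    exact (PySem.Set.mem_ofList ..).mpr ((PySem.List.mem_sorted ..).mp hxA)

-- ===== VERDICT (by name: the statement is the Claim_ definition above) =====
theorem find_element_two_spec : Claim_equal_find_element_two := by
  intro A B _
  unfold Spec_find_element_two
  exact ports_agree A B
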